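-- pv_equiv track=rewrite | github.com/Shebyyy/sources-dart | organize_sources.py | normalize_type
-- ===== SOURCE A (Python) =====
-- def normalize_type(type_str: str) -> str:
--     """Normalize the type string to a consistent format."""
--     if not type_str:
--         return "other"
--
--     # Clean up the type string
--     type_clean = type_str.lower().strip()
--     # Replace common separators with underscores
--     type_clean = type_clean.replace("/", "_").replace(" ", "_").replace("-", "_")
--     # Remove multiple underscores
--     while "__" in type_clean:
--         type_clean = type_clean.replace("__", "_")
--
--     return type_clean
-- ===== SOURCE B (Python) =====
-- def normalize_type(type_str: str) -> str:
--     """Normalize the type string to a consistent format (single forward pass)."""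
--     if not type_str:
--         return "other"
--     out = []
--     last_us = False
--     for ch in type_str.lower().strip():
--         if ch in "/ -":
--             ch = "_"
--         if ch == "_" and last_us:
--             continue
--         out.append(ch)
--         last_us = ch == "_"
--     return "".join(out)
-- ===== Notes on version B (the rewrite author's own statement) =====
-- stated objective: alternative
-- what changed: Replaced the three sequential .replace() passes plus the repeated while-loop that collapses doubled underscores by a single forward pass that translates separators and skips an underscore when the previous emitted character was one.
import Mathlib
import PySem

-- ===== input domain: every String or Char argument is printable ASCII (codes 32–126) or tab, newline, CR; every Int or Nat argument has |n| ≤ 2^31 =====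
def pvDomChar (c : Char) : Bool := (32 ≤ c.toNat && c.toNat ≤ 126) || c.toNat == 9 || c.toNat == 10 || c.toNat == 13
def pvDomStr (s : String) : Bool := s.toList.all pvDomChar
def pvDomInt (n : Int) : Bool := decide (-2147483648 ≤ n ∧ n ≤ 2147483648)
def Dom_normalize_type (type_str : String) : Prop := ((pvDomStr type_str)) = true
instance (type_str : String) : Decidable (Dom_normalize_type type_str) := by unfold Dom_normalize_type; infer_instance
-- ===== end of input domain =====

-- B changes: one forward pass that translates '/',' ','-' to '_' and drops an underscore right
-- after an emitted one, instead of A's three .replace() passes plus the repeated collapsing while loop.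

-- ===== PORT A =====
-- helpers for the termination of A's while loop (the port cites pvReplaceDecreases by name):
-- pvRep is a structural form of one collapsing replace pass, used to bound its length.
def pvRep : List Char → List Char
  | [] => []
  | [c] => [c]
  | c :: d :: t => if c = '_' ∧ d = '_' then '_' :: pvRep t else c :: pvRep (d :: t)

theorem pvGo_rep (fuel : Nat) (l acc : List Char) (h : l.length ≤ fuel) :
    PySem.Chars.replace.go ['_', '_'] ['_'] fuel l acc = acc.reverse ++ pvRep l := by
  induction fuel generalizing l acc with
  | zero =>
    have : l = [] := List.eq_nil_of_length_eq_zero (Nat.le_zero.mp h)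
    subst this
    rw [PySem.Chars.replace.go]; simp [pvRep]
  | succ fuel ih =>
    match l with
    | [] => rw [PySem.Chars.replace.go] <;> simp [pvRep]
    | [c] =>
      rw [PySem.Chars.replace.go]
      have hp : ['_', '_'].isPrefixOf [c] = false := by simp [List.isPrefixOf]
      rw [hp]
      simp only [Bool.false_eq_true, if_false]
      rw [ih [] (c :: acc) (by simp)]
      simp [pvRep]
    | c :: d :: t =>
      rw [PySem.Chars.replace.go]
      by_cases hcd : c = '_' ∧ d = '_'
      · obtain ⟨hc, hd⟩ := hcd
        subst hc; subst hd
        have hp : ['_', '_'].isPrefixOf ('_' :: '_' :: t) = true := by simp [List.isPrefixOf]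
        rw [hp]
        simp only [if_true]
        rw [show List.drop (['_', '_'] : List Char).length ('_' :: '_' :: t) = t from rfl]
        rw [ih t (['_'].reverse ++ acc) (by simp at h ⊢; omega)]
        simp [pvRep]
      · have hp : ['_', '_'].isPrefixOf (c :: d :: t) = false := by
          simp [List.isPrefixOf]
          intro hc hd
          exact hcd ⟨hc.symm, hd.symm⟩
        rw [hp]
        simp only [Bool.false_eq_true, if_false]
        rw [ih (d :: t) (c :: acc) (by simp at h ⊢; omega)]
        simp [pvRep, hcd]
theorem pvReplace_eq_rep (cs : List Char) :
    PySem.Chars.replace cs ['_', '_'] ['_'] = pvRep cs := by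
  rw [PySem.Chars.replace]
  simp only [List.isEmpty_cons, Bool.false_eq_true, if_false]
  rw [pvGo_rep cs.length cs [] le_rfl]
  simp

theorem pvRep_len_le (cs : List Char) : (pvRep cs).length ≤ cs.length := by
  induction cs using pvRep.induct with
  | case1 => simp [pvRep]
  | case2 c => simp [pvRep]
  | case3 c d t h ih => simp only [pvRep, if_pos h, List.length_cons] at ih ⊢; omega
  | case4 c d t h ih => simp only [pvRep, if_neg h, List.length_cons] at ih ⊢; omega

theorem pvRep_len_lt (cs : List Char) (h : ['_', '_'] <:+: cs) :
    (pvRep cs).length < cs.length := by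
  induction cs using pvRep.induct with
  | case1 => simp at h
  | case2 c =>
    exfalso
    have := h.length_le
    simp at this
  | case3 c d t hcd ih =>
    simp only [pvRep, hcd]
    have := pvRep_len_le t
    simp; omega
  | case4 c d t hcd ih =>
    simp only [pvRep, hcd, if_false]
    have h' : ['_', '_'] <:+: (d :: t) := by
      rcases List.infix_cons_iff.mp h with hpre | hinf
      · exfalso
        rcases hpre with ⟨r, hr⟩
        simp at hr
        exact hcd ⟨hr.1.symm, hr.2.1.symm⟩
      · exact hinf
    have := ih h'
    simpa using Nat.succ_lt_succ this

-- length strictly decreases when "__" occurrs, so A's while loop terminates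
theorem pvReplaceDecreases (cs : List Char) (h : PySem.Chars.isIn ['_', '_'] cs = true) :
    (PySem.Chars.replace cs ['_', '_'] ['_']).length < cs.length := by
  rw [pvReplace_eq_rep]
  exact pvRep_len_lt cs ((PySem.Chars.isIn_iff_infix _ _).mp h)

-- the collapsing while loop of A
def pvLoopA (cs : List Char) : List Char :=
  if _h : PySem.Chars.isIn ['_', '_'] cs = true then
    pvLoopA (PySem.Chars.replace cs ['_', '_'] ['_'])
  else cs
termination_by cs.length
decreasing_by exact pvReplaceDecreases cs _h

def normalize_type (type_str : String) : String :=
  if type_str = "" then "other"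
  else
    let type_clean := PySem.Chars.strip (PySem.Chars.lower type_str.toList)
    let type_clean :=
      PySem.Chars.replace (PySem.Chars.replace (PySem.Chars.replace type_clean ['/'] ['_']) [' '] ['_']) ['-'] ['_']
    String.ofList (pvLoopA type_clean)

-- ===== PORT B =====
-- the for-loop of Source B: translate separators, skip '_' when the last emitted char was '_'
def pvAltGo : List Char → Bool → List Char
  | [], _ => []
  | c :: cs, last_us =>
    let ch := if c = '/' ∨ c = ' ' ∨ c = '-' then '_' else c
    if ch = '_' ∧ last_us then pvAltGo cs last_us
    else ch :: pvAltGo cs (ch = '_')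

def normalize_type_alt (type_str : String) : String :=
  if type_str = "" then "other"
  else String.ofList (pvAltGo (PySem.Chars.strip (PySem.Chars.lower type_str.toList)) false)

-- ===== PRECONDITION & SPEC =====
def Spec_normalize_type (type_str : String) (out : String) : Prop := out = normalize_type_alt type_str
instance (type_str : String) (out : String) : Decidable (Spec_normalize_type type_str out) := by unfold Spec_normalize_type; infer_instance

-- ===== CLAIM (what is proved, stated in full; the proofs are below) =====
def Claim_equal_normalize_type : Prop := ∀ (type_str : String), Dom_normalize_type type_str → Spec_normalize_type type_str (normalize_type type_str)

-- ===== LEMMAS AND PROOFS =====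

-- collapse pass without the separator translation
def pvGoC : List Char → Bool → List Char
  | [], _ => []
  | c :: cs, last_us =>
    if c = '_' ∧ last_us then pvGoC cs last_us
    else c :: pvGoC cs (c = '_')

theorem pvGo_map (a b : Char) (fuel : Nat) (l acc : List Char) (h : l.length ≤ fuel) :
    PySem.Chars.replace.go [a] [b] fuel l acc
      = acc.reverse ++ l.map (fun c => if c = a then b else c) := by
  induction fuel generalizing l acc with
  | zero =>
    have : l = [] := List.eq_nil_of_length_eq_zero (Nat.le_zero.mp h)
    subst this
    rw [PySem.Chars.replace.go]; simp
  | succ fuel ih =>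
    match l with
    | [] => rw [PySem.Chars.replace.go] <;> simp
    | c :: t =>
      rw [PySem.Chars.replace.go]
      by_cases hc : c = a
      · subst hc
        have hp : [c].isPrefixOf (c :: t) = true := by simp [List.isPrefixOf]
        rw [hp]
        simp only [if_true]
        rw [show List.drop ([c] : List Char).length (c :: t) = t from rfl]
        rw [ih t ([b].reverse ++ acc) (by simp at h ⊢; omega)]
        simp
      · have hp : [a].isPrefixOf (c :: t) = false := by simp [List.isPrefixOf]; exact fun h => absurd h.symm hc
        rw [hp]
        simp only [Bool.false_eq_true, if_false]
        rw [ih t (c :: acc) (by simp at h ⊢; omega)]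
        simp [hc]

theorem pvReplace_single (a b : Char) (cs : List Char) :
    PySem.Chars.replace cs [a] [b] = cs.map (fun c => if c = a then b else c) := by
  rw [PySem.Chars.replace]
  simp only [List.isEmpty_cons, Bool.false_eq_true, if_false]
  rw [pvGo_map a b cs.length cs [] le_rfl]
  simp

theorem pvGoC_cons (c : Char) (cs : List Char) (last_us : Bool) :
    pvGoC (c :: cs) last_us
      = if c = '_' ∧ last_us = true then pvGoC cs last_us else c :: pvGoC cs (decide (c = '_')) := rfl

theorem pvGoC_rep (cs : List Char) : ∀ last_us, pvGoC (pvRep cs) last_us = pvGoC cs last_us := by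
  induction cs using pvRep.induct with
  | case1 => intro last_us; simp [pvRep]
  | case2 c => intro last_us; simp [pvRep]
  | case3 c d t hcd ih =>
    intro last_us
    obtain ⟨hc, hd⟩ := hcd
    subst hc; subst hd
    cases last_us with
    | true => simp [pvRep, pvGoC_cons, ih]
    | false => simp [pvRep, pvGoC_cons, ih]
  | case4 c d t hcd ih =>
    intro last_us
    simp only [pvRep, if_neg hcd]
    by_cases hc : c = '_' ∧ last_us = true
    · rw [pvGoC_cons, if_pos hc, pvGoC_cons, if_pos hc, ih]
    · rw [pvGoC_cons, if_neg hc, pvGoC_cons, if_neg hc, ih]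

theorem pvGoC_id (cs : List Char) : ∀ last_us, ¬ (['_', '_'] <:+: cs) →
    (last_us = true → ¬ cs.head? = some '_') → pvGoC cs last_us = cs := by
  induction cs with
  | nil => intro last_us _ _; simp [pvGoC]
  | cons c t ih =>
    intro last_us hinf hhd
    have hnc : ¬ (c = '_' ∧ last_us = true) := by
      rintro ⟨hc, hl⟩
      exact hhd hl (by simp [hc])
    simp only [pvGoC, if_neg hnc]
    congr 1
    apply ih
    · intro h; exact hinf (List.infix_cons h)
    · intro hc' hhd'
      apply hinf
      cases t with
      | nil => simp at hhd'
      | cons d t' =>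
        simp at hhd'
        have hc : c = '_' := by simpa using hc'
        subst hc; subst hhd'
        exact ⟨[], t', rfl⟩

theorem pvLoopA_eq (cs : List Char) : pvLoopA cs = pvGoC cs false := by
  induction cs using pvLoopA.induct with
  | case1 cs h ih =>
    rw [pvLoopA, dif_pos h, ih, pvReplace_eq_rep, pvGoC_rep]
  | case2 cs h =>
    rw [pvLoopA, dif_neg h]
    have hninf : ¬ (['_', '_'] <:+: cs) := by
      rw [← PySem.Chars.isIn_iff_infix _ _]
      simpa using h
    exact (pvGoC_id cs false hninf (by simp)).symm

theorem pvAltGo_eq (cs : List Char) : ∀ last_us,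
    pvAltGo cs last_us = pvGoC (cs.map (fun c => if c = '/' ∨ c = ' ' ∨ c = '-' then '_' else c)) last_us := by
  induction cs with
  | nil => intro last_us; simp [pvAltGo, pvGoC]
  | cons c t ih =>
    intro last_us
    simp only [pvAltGo, List.map_cons]
    by_cases h : (if c = '/' ∨ c = ' ' ∨ c = '-' then '_' else c) = '_' ∧ last_us = true
    · simp only [pvGoC, if_pos h, ih]
    · simp only [pvGoC, if_neg h, ih]

theorem pvMap_tr (cs : List Char) :
    (((cs.map (fun c => if c = '/' then '_' else c)).map (fun c => if c = ' ' then '_' else c)).map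
        (fun c => if c = '-' then '_' else c))
      = cs.map (fun c => if c = '/' ∨ c = ' ' ∨ c = '-' then '_' else c) := by
  simp only [List.map_map]
  apply List.map_congr_left
  intro c _
  simp only [Function.comp]
  by_cases h1 : c = '/' <;> by_cases h2 : c = ' ' <;> by_cases h3 : c = '-' <;> simp_all

-- ===== VERDICT (by name: the statement is the Claim_ definition above) =====
theorem normalize_type_spec : Claim_equal_normalize_type := by
  intro type_str _
  unfold Spec_normalize_type normalize_type normalize_type_alt
  by_cases h : type_str = ""
  · simp [h]
  · simp only [if_neg h]
    congr 1
    rw [pvReplace_single, pvReplace_single, pvReplace_single, pvMap_tr, pvLoopA_eq, pvAltGo_eq]
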